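-- pv_equiv track=rewrite | github.com/sorimdevs-tech/javaapex_frontend | java-migration-backend/Java_Migration_Accelerator_backend/java-migration-backend/services/migration_service.py | _migrate_javax_to_jakarta
-- ===== SOURCE A (Python) =====
-- def _migrate_javax_to_jakarta(pom_content: str) -> str:
--     """Migrate javax dependencies to jakarta for Java 17+"""
--     replacements = [
--         ('javax.servlet:javax.servlet-api', 'jakarta.servlet:jakarta.servlet-api'),
--         ('javax.persistence:javax.persistence-api', 'jakarta.persistence:jakarta.persistence-api'),
--         ('javax.validation:validation-api', 'jakarta.validation:jakarta.validation-api'),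
--         ('javax.annotation:javax.annotation-api', 'jakarta.annotation:jakarta.annotation-api'),
--     ]
--
--     for old, new in replacements:
--         old_group, old_artifact = old.split(':')
--         new_group, new_artifact = new.split(':')
--
--         pom_content = pom_content.replace(
--             f'<groupId>{old_group}</groupId>',
--             f'<groupId>{new_group}</groupId>'
--         )
--         pom_content = pom_content.replace(
--             f'<artifactId>{old_artifact}</artifactId>',
--             f'<artifactId>{new_artifact}</artifactId>'
--         )
--
--     return pom_content
-- ===== SOURCE B (Python) =====
-- def _migrate_javax_to_jakarta(pom_content: str) -> str:
--     """Migrate javax dependencies to jakarta for Java 17+ (single left-to-right pass)."""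
--     replacements = [
--         ('<groupId>javax.servlet</groupId>', '<groupId>jakarta.servlet</groupId>'),
--         ('<artifactId>javax.servlet-api</artifactId>', '<artifactId>jakarta.servlet-api</artifactId>'),
--         ('<groupId>javax.persistence</groupId>', '<groupId>jakarta.persistence</groupId>'),
--         ('<artifactId>javax.persistence-api</artifactId>', '<artifactId>jakarta.persistence-api</artifactId>'),
--         ('<groupId>javax.validation</groupId>', '<groupId>jakarta.validation</groupId>'),
--         ('<artifactId>validation-api</artifactId>', '<artifactId>jakarta.validation-api</artifactId>'),
--         ('<groupId>javax.annotation</groupId>', '<groupId>jakarta.annotation</groupId>'),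
--         ('<artifactId>javax.annotation-api</artifactId>', '<artifactId>jakarta.annotation-api</artifactId>'),
--     ]
--     out = []
--     i = 0
--     n = len(pom_content)
--     while i < n:
--         for old, new in replacements:
--             if pom_content.startswith(old, i):
--                 out.append(new)
--                 i += len(old)
--                 break
--         else:
--             out.append(pom_content[i])
--             i += 1
--     return ''.join(out)
-- ===== Notes on version B (the rewrite author's own statement) =====
-- stated objective: alternative
-- what changed: A makes eight sequential full-string str.replace passes (one per tag); B builds the eight (old tag, new tag) pairs once and performs a single left-to-right pass over the string, trying the pairs at each position and emitting the replacement of the first match.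
import Mathlib
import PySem

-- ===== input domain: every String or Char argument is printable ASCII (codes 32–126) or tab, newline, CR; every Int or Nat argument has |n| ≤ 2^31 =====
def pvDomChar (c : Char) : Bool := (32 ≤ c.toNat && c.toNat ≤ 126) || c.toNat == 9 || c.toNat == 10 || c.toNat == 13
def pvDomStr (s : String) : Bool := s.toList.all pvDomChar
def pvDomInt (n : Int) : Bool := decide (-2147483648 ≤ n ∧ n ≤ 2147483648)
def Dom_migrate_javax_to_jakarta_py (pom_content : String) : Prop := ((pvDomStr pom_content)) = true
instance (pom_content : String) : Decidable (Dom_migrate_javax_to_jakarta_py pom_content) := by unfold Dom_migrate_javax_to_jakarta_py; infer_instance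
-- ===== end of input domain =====

-- B replaces A's eight sequential full-string str.replace passes by ONE left-to-right scan that
-- tries the eight (old tag → new tag) pairs at each position (objective: alternative single-pass
-- algorithm; proved to return exactly A's value on every input).

-- ===== PORT A =====
-- A's replacement table of 'group:artifact' coordinate pairs
def pvRepsA : List (String × String) :=
  [("javax.servlet:javax.servlet-api", "jakarta.servlet:jakarta.servlet-api"),
   ("javax.persistence:javax.persistence-api", "jakarta.persistence:jakarta.persistence-api"),
   ("javax.validation:validation-api", "jakarta.validation:jakarta.validation-api"),
   ("javax.annotation:javax.annotation-api", "jakarta.annotation:jakarta.annotation-api")]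

def migrate_javax_to_jakarta_py (pom_content : String) : String :=
  pvRepsA.foldl (fun pom r =>
    let oldParts := (PySem.Str.split? r.1 ":").getD []
    let newParts := (PySem.Str.split? r.2 ":").getD []
    let old_group := oldParts.getD 0 ""
    let old_artifact := oldParts.getD 1 ""
    let new_group := newParts.getD 0 ""
    let new_artifact := newParts.getD 1 ""
    let pom := PySem.Str.replace pom ("<groupId>" ++ old_group ++ "</groupId>")
                                     ("<groupId>" ++ new_group ++ "</groupId>")
    PySem.Str.replace pom ("<artifactId>" ++ old_artifact ++ "</artifactId>")
                          ("<artifactId>" ++ new_artifact ++ "</artifactId>"))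
    pom_content

-- ===== PORT B =====
-- B's table: the eight full old tags with their jakarta replacements (Source B's `replacements`)
def pvReps : List (List Char × List Char) :=
  [("<groupId>javax.servlet</groupId>".toList, "<groupId>jakarta.servlet</groupId>".toList),
   ("<artifactId>javax.servlet-api</artifactId>".toList, "<artifactId>jakarta.servlet-api</artifactId>".toList),
   ("<groupId>javax.persistence</groupId>".toList, "<groupId>jakarta.persistence</groupId>".toList),
   ("<artifactId>javax.persistence-api</artifactId>".toList, "<artifactId>jakarta.persistence-api</artifactId>".toList),
   ("<groupId>javax.validation</groupId>".toList, "<groupId>jakarta.validation</groupId>".toList),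
   ("<artifactId>validation-api</artifactId>".toList, "<artifactId>jakarta.validation-api</artifactId>".toList),
   ("<groupId>javax.annotation</groupId>".toList, "<groupId>jakarta.annotation</groupId>".toList),
   ("<artifactId>javax.annotation-api</artifactId>".toList, "<artifactId>jakarta.annotation-api</artifactId>".toList)]

-- Source B's inner `for old, new in replacements: if pom_content.startswith(old, i)` search
def pvTryKeys : List (List Char × List Char) → List Char → Option (List Char × List Char)
  | [], _ => none
  | (k, v) :: rs, s => if k.isPrefixOf s then some (k, v) else pvTryKeys rs s

-- Source B's `while i < n` loop; the fuel is the number of remaining loop steps (≤ length suffices)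
def pvMsGo (rs : List (List Char × List Char)) : Nat → List Char → List Char
  | 0, l => l
  | _ + 1, [] => []
  | fuel + 1, c :: t =>
    match pvTryKeys rs (c :: t) with
    | some (k, v) => v ++ pvMsGo rs fuel ((c :: t).drop k.length)
    | none => c :: pvMsGo rs fuel t

def pvMultiScan (rs : List (List Char × List Char)) (s : List Char) : List Char :=
  pvMsGo rs s.length s

def migrate_javax_to_jakarta_py_alt (pom_content : String) : String :=
  String.ofList (pvMultiScan pvReps pom_content.toList)

-- ===== PRECONDITION & SPEC =====
def Spec_migrate_javax_to_jakarta_py (pom_content : String) (out : String) : Prop := out = migrate_javax_to_jakarta_py_alt pom_content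
instance (pom_content : String) (out : String) : Decidable (Spec_migrate_javax_to_jakarta_py pom_content out) := by unfold Spec_migrate_javax_to_jakarta_py; infer_instance

-- ===== CLAIM (what is proved, stated in full; the proofs are below) =====
def Claim_equal_migrate_javax_to_jakarta_py : Prop := ∀ (pom_content : String), Dom_migrate_javax_to_jakarta_py pom_content → Spec_migrate_javax_to_jakarta_py pom_content (migrate_javax_to_jakarta_py pom_content)

-- ===== LEMMAS AND PROOFS =====

-- Boolean side conditions making the eight passes non-interfering (checked by `decide` on the literals)

-- no nonempty suffix of a is a prefix of b
def pvNoSufPreB (a b : List Char) : Bool := a.tails.all (fun σ => σ.isEmpty || !σ.isPrefixOf b)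
-- a is not a prefix of any suffix of b (i.e. not an infix of b)
def pvNoInfixB (a b : List Char) : Bool := b.tails.all (fun σ => !(a.isPrefixOf σ))
-- k matches nowhere strictly inside an occurrence of k'
def pvKeyOvlB (k k' : List Char) : Bool :=
  k'.tails.all (fun σ => σ.isEmpty || σ == k' || (!(k.isPrefixOf σ) && !(σ.isPrefixOf k)))

def pvMergeOKB (k v : List Char) (rs' : List (List Char × List Char)) : Bool :=
  !k.isEmpty && rs'.all (fun p =>
    !p.1.isEmpty && pvNoSufPreB p.1 v && pvNoInfixB v p.1 && pvNoInfixB p.1 v &&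
    pvNoSufPreB v p.1 && pvKeyOvlB k p.1 &&
    rs'.all (fun q => p.1 == q.1 || !(p.1.isPrefixOf q.1)))

def pvGoodB : List (List Char × List Char) → Bool
  | [] => true
  | (k, v) :: rs' => pvMergeOKB k v rs' && pvGoodB rs'

-- basic facts about pvTryKeys / pvMsGo / pvMultiScan
theorem pvTryKeys_none_iff (rs : List (List Char × List Char)) (s : List Char) :
    pvTryKeys rs s = none ↔ ∀ p ∈ rs, ¬ p.1 <+: s := by
  induction rs with
  | nil => simp [pvTryKeys]
  | cons hd tl ih =>
    obtain ⟨k, v⟩ := hd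
    by_cases h : k.isPrefixOf s <;>
      simp_all [pvTryKeys, List.isPrefixOf_iff_prefix]

theorem pvTryKeys_some (rs : List (List Char × List Char)) (s k v : _)
    (h : pvTryKeys rs s = some (k, v)) : (k, v) ∈ rs ∧ k <+: s := by
  induction rs with
  | nil => simp [pvTryKeys] at h
  | cons hd tl ih =>
    obtain ⟨k0, v0⟩ := hd
    by_cases hp : k0.isPrefixOf s
    · simp [pvTryKeys, hp] at h
      obtain ⟨rfl, rfl⟩ := h
      exact ⟨by simp, List.isPrefixOf_iff_prefix.mp hp⟩
    · simp [pvTryKeys, hp] at h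
      obtain ⟨h1, h2⟩ := ih h
      exact ⟨by simp [h1], h2⟩

theorem pvMsGo_eq_of_le (rs : List (List Char × List Char)) (hne : ∀ p ∈ rs, p.1 ≠ []) :
    ∀ fuel fuel' s, s.length ≤ fuel → s.length ≤ fuel' → pvMsGo rs fuel s = pvMsGo rs fuel' s := by
  intro fuel
  induction fuel with
  | zero =>
    intro fuel' s h h'
    have hs : s = [] := List.length_eq_zero_iff.mp (Nat.le_zero.mp h)
    subst hs
    cases fuel' <;> simp [pvMsGo]
  | succ f ih =>
    intro fuel' s h h'
    cases s with
    | nil => cases fuel' <;> simp [pvMsGo]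
    | cons c t =>
      cases fuel' with
      | zero => simp at h'
      | succ f' =>
        simp only [pvMsGo]
        cases htk : pvTryKeys rs (c :: t) with
        | none =>
          simp only []
          rw [ih f' t (by simpa using Nat.lt_succ_iff.mp (Nat.lt_of_lt_of_le (by simp) h))
            (by simp at h'; omega)]
        | some p =>
          obtain ⟨k, v⟩ := p
          simp only []
          have hk := (pvTryKeys_some rs _ _ _ htk).1
          have hkne : k ≠ [] := hne _ hk
          have hk1 : 1 ≤ k.length := by
            cases k with | nil => exact absurd rfl hkne | cons a b => simp
          rw [ih f' _ (by simp at h ⊢; omega) (by simp at h' ⊢; omega)]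

theorem pvMultiScan_step_none (rs : List (List Char × List Char)) (c : Char) (t : List Char)
    (h : pvTryKeys rs (c :: t) = none) :
    pvMultiScan rs (c :: t) = c :: pvMultiScan rs t := by
  simp [pvMultiScan, pvMsGo, h]

theorem pvMultiScan_step_some (rs : List (List Char × List Char)) (hne : ∀ p ∈ rs, p.1 ≠ [])
    (s k v : _) (hs : s ≠ []) (h : pvTryKeys rs s = some (k, v)) :
    pvMultiScan rs s = v ++ pvMultiScan rs (s.drop k.length) := by
  cases s with
  | nil => exact absurd rfl hs
  | cons c t =>
    have hk := (pvTryKeys_some rs _ _ _ h).1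
    have hkne : k ≠ [] := hne _ hk
    have hk1 : 1 ≤ k.length := by
      cases k with | nil => exact absurd rfl hkne | cons a b => simp
    simp only [pvMultiScan, List.length_cons, pvMsGo, h]
    congr 1
    exact pvMsGo_eq_of_le rs hne t.length _ _ (by simp; omega) (by simp)

theorem pvMultiScan_nilKeys (s : List Char) : pvMultiScan [] s = s := by
  induction s with
  | nil => rfl
  | cons c t ih => rw [pvMultiScan_step_none [] c t rfl, ih]

-- splitting a prefix of an append
theorem pvPrefixAppendCases {σ a b : List Char} (h : σ <+: a ++ b) :
    σ <+: a ∨ (a <+: σ ∧ σ.drop a.length <+: b) := by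
  by_cases hl : σ.length ≤ a.length
  · exact Or.inl (List.prefix_of_prefix_length_le h (List.prefix_append a b) hl)
  · have ha : a <+: σ := List.prefix_of_prefix_length_le (List.prefix_append a b) h (by omega)
    refine Or.inr ⟨ha, ?_⟩
    obtain ⟨u, hu⟩ := ha
    obtain ⟨r, hr⟩ := h
    subst hu
    rw [List.drop_left]
    rw [List.append_assoc] at hr
    exact ⟨r, (List.append_cancel_left hr)⟩

-- unpacking the Boolean side conditions
theorem pvNoSufPre_spec {a b : List Char} (h : pvNoSufPreB a b = true) :
    ∀ σ, σ <:+ a → σ ≠ [] → ¬ σ <+: b := by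
  intro σ hσ hne hpre
  have := (List.all_eq_true.mp h) σ ((List.mem_tails σ a).mpr hσ)
  rw [← List.isPrefixOf_iff_prefix] at hpre
  simp [List.isEmpty_iff, hne, hpre] at this

theorem pvNoInfix_spec {a b : List Char} (h : pvNoInfixB a b = true) :
    ∀ σ, σ <:+ b → ¬ a <+: σ := by
  intro σ hσ hpre
  have := (List.all_eq_true.mp h) σ ((List.mem_tails σ b).mpr hσ)
  rw [← List.isPrefixOf_iff_prefix] at hpre
  simp [hpre] at this

theorem pvKeyOvl_spec {k k' : List Char} (h : pvKeyOvlB k k' = true) :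
    ∀ σ, σ <:+ k' → σ ≠ [] → σ ≠ k' → ¬ k <+: σ ∧ ¬ σ <+: k := by
  intro σ hσ hne hnek
  have := (List.all_eq_true.mp h) σ ((List.mem_tails σ k').mpr hσ)
  refine ⟨fun hp => ?_, fun hp => ?_⟩ <;> rw [← List.isPrefixOf_iff_prefix] at hp <;>
    simp [List.isEmpty_iff, hne, hnek, hp] at this

-- 'no new matches': a match of a suffix of k' in the single-pass output was already in the input
theorem pvNN2 (k v k' : List Char) (hk : k ≠ []) (h1 : pvNoSufPreB k' v = true) (h2 : pvNoInfixB v k' = true) :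
    ∀ n s σ, s.length ≤ n → σ ≠ [] → σ <:+ k' → σ <+: pvMultiScan [(k, v)] s → σ <+: s := by
  intro n
  induction n with
  | zero =>
    intro s σ hs hne _ hp
    have : s = [] := List.length_eq_zero_iff.mp (Nat.le_zero.mp hs)
    subst this
    simp [pvMultiScan, pvMsGo] at hp
    exact absurd hp hne
  | succ n ih =>
    intro s σ hs hne hsuf hp
    cases s with
    | nil =>
      simp [pvMultiScan, pvMsGo] at hp
      exact absurd hp hne
    | cons c t =>
      by_cases hkp : k.isPrefixOf (c :: t)
      · have hsome : pvTryKeys [(k, v)] (c :: t) = some (k, v) := by simp [pvTryKeys, hkp]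
        rw [pvMultiScan_step_some [(k, v)] (by simp [hk]) _ k v (by simp) hsome] at hp
        rcases pvPrefixAppendCases hp with hcase | hcase
        · exact absurd hcase (pvNoSufPre_spec h1 σ hsuf hne)
        · exact absurd hcase.1 (pvNoInfix_spec h2 σ hsuf)
      · have hnone : pvTryKeys [(k, v)] (c :: t) = none := by simp [pvTryKeys, hkp]
        rw [pvMultiScan_step_none _ _ _ hnone] at hp
        cases σ with
        | nil => exact absurd rfl hne
        | cons a σtl =>
          rw [List.cons_prefix_cons] at hp
          obtain ⟨rfl, hp2⟩ := hp
          by_cases hσtl : σtl = []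
          · subst hσtl
            simp
          · have : σtl <+: t :=
              ih t σtl (by simpa using Nat.lt_succ_iff.mp (by simpa using hs)) hσtl
                (List.IsSuffix.trans (List.suffix_cons a σtl) hsuf) hp2
            exact List.cons_prefix_cons.mpr ⟨rfl, this⟩

-- a scan passes over a block no key matches into
theorem pvScanSkip (rs : List (List Char × List Char)) :
    ∀ v X, (∀ i < v.length, pvTryKeys rs (v.drop i ++ X) = none) →
      pvMultiScan rs (v ++ X) = v ++ pvMultiScan rs X := by
  intro v X
  induction v with
  | nil => simp
  | cons c v' ih =>
    intro hnone
    have h0 := hnone 0 (by simp)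
    simp only [List.drop_zero] at h0
    rw [List.cons_append] at h0 ⊢
    rw [pvMultiScan_step_none _ _ _ h0]
    rw [ih (fun i hi => by simpa using hnone (i + 1) (by simpa using hi))]
    simp

-- a single-key scan passes over a region the key does not match in
theorem pvScan1Skip (k v : List Char) :
    ∀ m s, m ≤ s.length → (∀ p < m, ¬ k <+: s.drop p) →
      pvMultiScan [(k, v)] s = s.take m ++ pvMultiScan [(k, v)] (s.drop m) := by
  intro m
  induction m with
  | zero => intro s _ _; simp
  | succ m ih =>
    intro s hm hno
    cases s with
    | nil => simp at hm
    | cons c t =>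
      have h0 : ¬ k <+: (c :: t) := by simpa using hno 0 (by omega)
      have hnone : pvTryKeys [(k, v)] (c :: t) = none := by
        simp [pvTryKeys, List.isPrefixOf_iff_prefix, h0]
      rw [pvMultiScan_step_none _ _ _ hnone]
      rw [ih t (by simpa using hm) (fun p hp => by simpa using hno (p + 1) (by omega))]
      simp

theorem pvTryKeys_stable (rs : List (List Char × List Char)) (s k' v' : _) (W : List Char)
    (hcond : ∀ p ∈ rs, p.1 ≠ k' → ¬ k' <+: p.1)
    (h : pvTryKeys rs s = some (k', v')) (hp : k' <+: s) :
    pvTryKeys rs (k' ++ W) = some (k', v') := by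
  induction rs with
  | nil => simp [pvTryKeys] at h
  | cons hd tl ih =>
    obtain ⟨k0, v0⟩ := hd
    by_cases hk0 : k0.isPrefixOf s
    · simp only [pvTryKeys, hk0, if_true, Option.some.injEq, Prod.mk.injEq] at h
      obtain ⟨rfl, rfl⟩ := h
      simp [pvTryKeys, List.isPrefixOf_iff_prefix]
    · simp only [pvTryKeys, hk0, Bool.false_eq_true, if_false] at h
      have hfalse : k0.isPrefixOf (k' ++ W) = false := by
        rw [Bool.eq_false_iff]
        intro htrue
        have hpre := List.isPrefixOf_iff_prefix.mp htrue
        rcases pvPrefixAppendCases hpre with hcase | hcase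
        · exact hk0 (List.isPrefixOf_iff_prefix.mpr (hcase.trans hp))
        · by_cases heq : k0 = k'
          · subst heq
            exact hk0 (List.isPrefixOf_iff_prefix.mpr hp)
          · exact hcond (k0, v0) (by simp) heq hcase.1
      simp only [pvTryKeys, hfalse, Bool.false_eq_true, if_false]
      exact ih (fun p hp hne => hcond p (by simp [hp]) hne) h

theorem pvMergeOK_facts (k v : List Char) (rs' : List (List Char × List Char))
    (hM : pvMergeOKB k v rs' = true) :
    k ≠ [] ∧ ∀ p ∈ rs', p.1 ≠ [] ∧ pvNoSufPreB p.1 v = true ∧ pvNoInfixB v p.1 = true ∧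
      pvNoInfixB p.1 v = true ∧ pvNoSufPreB v p.1 = true ∧ pvKeyOvlB k p.1 = true ∧
      ∀ q ∈ rs', p.1 ≠ q.1 → ¬ p.1 <+: q.1 := by
  simp only [pvMergeOKB, Bool.and_eq_true, List.all_eq_true, Bool.not_eq_true',
    List.isEmpty_eq_false_iff, Bool.or_eq_true, beq_iff_eq] at hM
  obtain ⟨hk, hrest⟩ := hM
  refine ⟨hk, fun p hp => ?_⟩
  obtain ⟨⟨⟨⟨⟨⟨h1, h2⟩, h3⟩, h4⟩, h5⟩, h6⟩, h7⟩ := hrest p hp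
  refine ⟨h1, h2, h3, h4, h5, h6, fun q hq hne => ?_⟩
  rcases h7 q hq with hc | hc
  · exact absurd hc hne
  · rw [← List.isPrefixOf_iff_prefix]
    simp [hc]

-- merging one pass into the head of a multi-pattern scan
theorem pvMerge (k v : List Char) (rs' : List (List Char × List Char))
    (hM : pvMergeOKB k v rs' = true) :
    ∀ n s, s.length ≤ n → pvMultiScan rs' (pvMultiScan [(k, v)] s) = pvMultiScan ((k, v) :: rs') s := by
  obtain ⟨hk, hfacts⟩ := pvMergeOK_facts k v rs' hM
  have hne' : ∀ p ∈ rs', p.1 ≠ [] := fun p hp => (hfacts p hp).1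
  have hneAll : ∀ p ∈ (k, v) :: rs', p.1 ≠ [] := by
    intro p hp
    rcases List.mem_cons.mp hp with rfl | hmem
    · exact hk
    · exact hne' p hmem
  have hne1 : ∀ p ∈ [(k, v)], p.1 ≠ [] := by simp [hk]
  have hk1 : 1 ≤ k.length := by cases k with | nil => exact absurd rfl hk | cons a b => simp
  intro n
  induction n with
  | zero =>
    intro s hs
    have : s = [] := List.length_eq_zero_iff.mp (Nat.le_zero.mp hs)
    subst this
    rfl
  | succ n ih =>
    intro s hs
    cases s with
    | nil => rfl
    | cons c t =>
      by_cases hkp : k <+: (c :: t)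
      · -- the head key matches first: both sides emit v and continue after it
        have hsome1 : pvTryKeys [(k, v)] (c :: t) = some (k, v) := by
          simp [pvTryKeys, List.isPrefixOf_iff_prefix, hkp]
        have hsomeA : pvTryKeys ((k, v) :: rs') (c :: t) = some (k, v) := by
          simp [pvTryKeys, List.isPrefixOf_iff_prefix, hkp]
        rw [pvMultiScan_step_some _ hne1 _ k v (by simp) hsome1]
        rw [pvMultiScan_step_some _ hneAll _ k v (by simp) hsomeA]
        rw [pvScanSkip rs' v _ (fun i hi => by
          rw [pvTryKeys_none_iff]
          intro p hp hpre
          rcases pvPrefixAppendCases hpre with hc | hc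
          · exact pvNoInfix_spec (hfacts p hp).2.2.2.1 _ (List.drop_suffix i v) hc
          · exact pvNoSufPre_spec (hfacts p hp).2.2.2.2.1 _ (List.drop_suffix i v)
              (by simp [List.drop_eq_nil_iff]; omega) hc.1)]
        rw [ih _ (by simp at hs ⊢; omega)]
      · cases hrest : pvTryKeys rs' (c :: t) with
        | some p =>
          -- a later key matches first at the head
          obtain ⟨k', v'⟩ := p
          obtain ⟨hmem, hk'p⟩ := pvTryKeys_some rs' _ _ _ hrest
          have hfp := hfacts _ hmem
          have hk'ne : k' ≠ [] := hfp.1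
          have hk'1 : 1 ≤ k'.length := by
            cases k' with | nil => exact absurd rfl hk'ne | cons a b => simp
          obtain ⟨Z, hZ⟩ := hk'p
          have hskip : pvMultiScan [(k, v)] (c :: t)
              = (c :: t).take k'.length ++ pvMultiScan [(k, v)] ((c :: t).drop k'.length) := by
            apply pvScan1Skip k v k'.length _ (by rw [← hZ]; simp)
            intro pp hpp hcontra
            by_cases hp0 : pp = 0
            · subst hp0
              exact hkp (by simpa using hcontra)
            · have hple : pp ≤ k'.length := by omega
              rw [← hZ, List.drop_append_of_le_length hple] at hcontra
              have hσ : k'.drop pp <:+ k' := List.drop_suffix pp k'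
              have hσne : k'.drop pp ≠ [] := by simp [List.drop_eq_nil_iff]; omega
              have hσnek : k'.drop pp ≠ k' := by
                intro heq
                have := congrArg List.length heq
                simp at this
                omega
              rcases pvPrefixAppendCases hcontra with hc | hc
              · exact (pvKeyOvl_spec hfp.2.2.2.2.2.1 _ hσ hσne hσnek).1 hc
              · exact (pvKeyOvl_spec hfp.2.2.2.2.2.1 _ hσ hσne hσnek).2 hc.1
          have htake : (c :: t).take k'.length = k' := by rw [← hZ, List.take_left]
          rw [hskip, htake]
          have hstable := pvTryKeys_stable rs' (c :: t) k' v'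
            (pvMultiScan [(k, v)] ((c :: t).drop k'.length))
            (fun q hq hneq => hfp.2.2.2.2.2.2 q hq (Ne.symm hneq)) hrest ⟨Z, hZ⟩
          rw [pvMultiScan_step_some _ hne' _ k' v' (by simp [hk'ne]) hstable]
          rw [List.drop_left]
          rw [ih _ (by simp at hs ⊢; omega)]
          have hsomeB : pvTryKeys ((k, v) :: rs') (c :: t) = some (k', v') := by
            have : k.isPrefixOf (c :: t) = false := by
              rw [Bool.eq_false_iff]
              exact fun h => hkp (List.isPrefixOf_iff_prefix.mp h)
            simp [pvTryKeys, this, hrest]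
          rw [pvMultiScan_step_some _ hneAll _ k' v' (by simp) hsomeB]
        | none =>
          -- no key matches at the head: both sides copy c
          have hnone1 : pvTryKeys [(k, v)] (c :: t) = none := by
            simp [pvTryKeys, List.isPrefixOf_iff_prefix, hkp]
          rw [pvMultiScan_step_none _ _ _ hnone1]
          have houter : pvTryKeys rs' (c :: pvMultiScan [(k, v)] t) = none := by
            rw [pvTryKeys_none_iff]
            intro p hp hpre
            have hfp := hfacts p hp
            have hnp : ¬ p.1 <+: (c :: t) := (pvTryKeys_none_iff _ _).mp hrest p hp
            cases hp1 : p.1 with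
            | nil => exact hfp.1 hp1
            | cons a tl =>
              rw [hp1, List.cons_prefix_cons] at hpre
              obtain ⟨rfl, htl⟩ := hpre
              by_cases htl0 : tl = []
              · subst htl0
                exact hnp (by rw [hp1]; exact List.cons_prefix_cons.mpr ⟨rfl, by simp⟩)
              · have := pvNN2 k v p.1 hk hfp.2.1 hfp.2.2.1 t.length t tl (le_refl _) htl0
                  (by rw [hp1]; exact List.suffix_cons a tl) htl
                exact hnp (by rw [hp1]; exact List.cons_prefix_cons.mpr ⟨rfl, this⟩)
          rw [pvMultiScan_step_none _ _ _ houter]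
          rw [ih t (by simpa using hs)]
          have hnoneB : pvTryKeys ((k, v) :: rs') (c :: t) = none := by
            have : k.isPrefixOf (c :: t) = false := by
              rw [Bool.eq_false_iff]
              exact fun h => hkp (List.isPrefixOf_iff_prefix.mp h)
            simp [pvTryKeys, this, hrest]
          rw [pvMultiScan_step_none _ _ _ hnoneB]

-- PySem.Chars.replace is the single-key scan
theorem pvGoAcc (k v : List Char) :
    ∀ fuel l acc, PySem.Chars.replace.go k v fuel l acc = acc.reverse ++ PySem.Chars.replace.go k v fuel l [] := by
  intro fuel
  induction fuel with
  | zero => intro l acc; simp [PySem.Chars.replace.go]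
  | succ f ih =>
    intro l acc
    cases l with
    | nil => simp [PySem.Chars.replace.go]
    | cons c t =>
      by_cases hp : k.isPrefixOf (c :: t)
      · simp only [PySem.Chars.replace.go, hp, if_true]
        rw [ih _ (v.reverse ++ acc), ih _ (v.reverse ++ [])]
        simp
      · simp only [PySem.Chars.replace.go, hp, Bool.false_eq_true, if_false]
        rw [ih t (c :: acc), ih t [c]]
        simp

theorem pvGoEqMsGo (k v : List Char) :
    ∀ fuel l, PySem.Chars.replace.go k v fuel l [] = pvMsGo [(k, v)] fuel l := by
  intro fuel
  induction fuel with
  | zero => intro l; simp [PySem.Chars.replace.go, pvMsGo]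
  | succ f ih =>
    intro l
    cases l with
    | nil => simp [PySem.Chars.replace.go, pvMsGo]
    | cons c t =>
      by_cases hp : k.isPrefixOf (c :: t)
      · simp only [PySem.Chars.replace.go, hp, if_true, pvMsGo, pvTryKeys]
        rw [pvGoAcc k v f _ (v.reverse ++ []), ih]
        simp
      · simp only [PySem.Chars.replace.go, hp, Bool.false_eq_true, if_false, pvMsGo, pvTryKeys]
        rw [pvGoAcc k v f t [c], ih]
        simp

theorem pvReplaceEq (k v : List Char) (hk : k ≠ []) (s : List Char) :
    PySem.Chars.replace s k v = pvMultiScan [(k, v)] s := by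
  rw [PySem.Chars.replace]
  have : k.isEmpty = false := by simp [List.isEmpty_eq_false_iff, hk]
  rw [this]
  simp only [Bool.false_eq_true, if_false]
  exact pvGoEqMsGo k v s.length s

-- the full chain of replaces equals the multi-pattern scan
theorem pvChainEq (rs : List (List Char × List Char)) (hg : pvGoodB rs = true) :
    ∀ s, rs.foldl (fun s p => PySem.Chars.replace s p.1 p.2) s = pvMultiScan rs s := by
  induction rs with
  | nil => intro s; simp [pvMultiScan_nilKeys]
  | cons p rs' ih =>
    obtain ⟨kk, vv⟩ := p
    have hM : pvMergeOKB kk vv rs' = true := by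
      simp only [pvGoodB, Bool.and_eq_true] at hg
      exact hg.1
    have hg' : pvGoodB rs' = true := by
      simp only [pvGoodB, Bool.and_eq_true] at hg
      exact hg.2
    have hkk : kk ≠ [] := (pvMergeOK_facts kk vv rs' hM).1
    intro s
    rw [List.foldl_cons, ih hg', pvReplaceEq kk vv hkk s]
    exact pvMerge kk vv rs' hM s.length _ (le_refl _)

-- ===== VERDICT (by name: the statement is the Claim_ definition above) =====
theorem migrate_javax_to_jakarta_py_spec : Claim_equal_migrate_javax_to_jakarta_py := by
  intro pom _
  unfold Spec_migrate_javax_to_jakarta_py migrate_javax_to_jakarta_py_alt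
  have hA : migrate_javax_to_jakarta_py pom
      = String.ofList (pvReps.foldl (fun s p => PySem.Chars.replace s p.1 p.2) pom.toList) := by
    simp only [migrate_javax_to_jakarta_py, pvRepsA, List.foldl_cons, List.foldl_nil, pvReps,
      PySem.Str.replace, String.toList_ofList]
    rfl
  rw [hA, pvChainEq pvReps (by decide) pom.toList]
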